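-- pv_equiv track=rewrite | github.com/Olya-sid/Olya | 2.1.py | differenceMaxMin
-- ===== SOURCE A (Python) =====
-- def differenceMaxMin(a):
--     ma = int(a[0])
--     mi = int(a[0])
--     for i in a[1:]:
--         if int(i) > int(ma):
--             ma = i
--         if int(i) < int(mi):
--             mi = i
--     return int(ma) - int(mi)
-- ===== SOURCE B (Python) =====
-- def differenceMaxMin(a):
--     s = sorted(int(x) for x in a)
--     return s[-1] - s[0]
-- ===== Notes on version B (the rewrite author's own statement) =====
-- stated objective: simpler
-- what changed: Replaces the running max/min scan over strings (re-coercing with int() at every comparison) by sorting the coerced values once and subtracting the first from the last element.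
import Mathlib
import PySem

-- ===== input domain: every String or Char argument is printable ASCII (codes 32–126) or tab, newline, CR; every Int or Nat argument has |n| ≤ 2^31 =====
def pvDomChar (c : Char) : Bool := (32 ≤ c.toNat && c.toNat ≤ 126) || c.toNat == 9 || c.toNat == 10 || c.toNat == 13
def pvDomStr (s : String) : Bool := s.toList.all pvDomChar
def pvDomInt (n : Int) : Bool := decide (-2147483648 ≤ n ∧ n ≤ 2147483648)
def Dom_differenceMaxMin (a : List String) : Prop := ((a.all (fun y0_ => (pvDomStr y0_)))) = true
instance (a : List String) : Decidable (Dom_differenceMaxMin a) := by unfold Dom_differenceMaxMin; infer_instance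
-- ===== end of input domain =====

-- B sorts the int()-coerced values once and subtracts the first from the last, instead of A's running max/min scan over strings.


-- ===== PORT A =====
-- int(s); Pre_ guarantees the parse succeeds, the default is never used inside Pre_
def pvIntA (s : String) : Int := (PySem.Int.ofStr? s).getD 0

def differenceMaxMin (a : List String) : Int :=
  match a with
  | [] => 0  -- a[0] raises IndexError; excluded by Pre_
  | x :: _ =>
    let p := (PySem.List.slice a (some 1) none).foldl
      (fun (p : String × String) i =>
        ( if pvIntA i > pvIntA p.1 then i else p.1,
          if pvIntA i < pvIntA p.2 then i else p.2)) (x, x)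
    pvIntA p.1 - pvIntA p.2

-- ===== PORT B =====
def differenceMaxMin_alt (a : List String) : Int :=
  let s := PySem.List.sorted (a.map pvIntA) (fun y => y) false
  match PySem.List.pyGet? s (-1), PySem.List.pyGet? s 0 with
  | some hi, some lo => hi - lo
  | _, _ => 0  -- s[-1] raises IndexError on the empty list; excluded by Pre_

-- ===== PRECONDITION & SPEC =====
-- Pre_ excludes exactly the inputs where Python A raises: the empty list (IndexError on a[0])
-- and lists with an element int() cannot parse (ValueError).
def Pre_differenceMaxMin (a : List String) : Prop :=
  a ≠ [] ∧ ∀ x ∈ a, (PySem.Int.ofStr? x).isSome = true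
instance (a : List String) : Decidable (Pre_differenceMaxMin a) := by unfold Pre_differenceMaxMin; infer_instance
def pvWitness_differenceMaxMin : List String := (["5", " -3", "12"])

def Spec_differenceMaxMin (a : List String) (out : Int) : Prop := out = differenceMaxMin_alt a
instance (a : List String) (out : Int) : Decidable (Spec_differenceMaxMin a out) := by unfold Spec_differenceMaxMin; infer_instance

-- ===== CLAIM (what is proved, stated in full; the proofs are below) =====
def Claim_equal_differenceMaxMin : Prop := ∀ (a : List String), Dom_differenceMaxMin a → Pre_differenceMaxMin a → Spec_differenceMaxMin a (differenceMaxMin a)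

-- ===== LEMMAS AND PROOFS =====

-- A's loop, first component: the coerced value of the kept max-string is the running max of coerced values.
theorem foldA_fst (rest : List String) (m n : String) :
    pvIntA ((rest.foldl (fun (p : String × String) i =>
        ( if pvIntA i > pvIntA p.1 then i else p.1,
          if pvIntA i < pvIntA p.2 then i else p.2)) (m, n)).1)
      = (rest.map pvIntA).foldl max (pvIntA m) := by
  induction rest generalizing m n with
  | nil => rfl
  | cons i t ih =>
    simp only [List.foldl_cons, List.map_cons]
    rw [ih]
    congr 1
    rw [max_def]
    by_cases h : pvIntA i > pvIntA m
    · simp [h]; omega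
    · simp [h]; omega

theorem foldA_snd (rest : List String) (m n : String) :
    pvIntA ((rest.foldl (fun (p : String × String) i =>
        ( if pvIntA i > pvIntA p.1 then i else p.1,
          if pvIntA i < pvIntA p.2 then i else p.2)) (m, n)).2)
      = (rest.map pvIntA).foldl min (pvIntA n) := by
  induction rest generalizing m n with
  | nil => rfl
  | cons i t ih =>
    simp only [List.foldl_cons, List.map_cons]
    rw [ih]
    congr 1
    rw [min_def]
    by_cases h : pvIntA i < pvIntA n
    · simp [h]
    · simp [h]

theorem le_getLast_of_pairwise (l : List Int) (h : l.Pairwise (· ≤ ·)) (g : Int)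
    (hg : l.getLast? = some g) : ∀ y ∈ l, y ≤ g := by
  induction l with
  | nil => simp at hg
  | cons m t ih =>
    intro y hy
    cases t with
    | nil =>
      simp at hg hy; omega
    | cons b t' =>
      rw [List.getLast?_cons_cons] at hg
      have hpw := List.pairwise_cons.mp h
      rcases List.mem_cons.mp hy with rfl | hy'
      · have hb : b ∈ b :: t' := List.mem_cons_self
        have hle : y ≤ b := hpw.1 b hb
        have := ih hpw.2 hg b hb
        omega
      · exact ih hpw.2 hg y hy'

-- sorted(l)[0] is the running min of l
theorem sorted_first (x : Int) (t : List Int) :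
    PySem.List.pyGet? (PySem.List.sorted (x :: t) (fun y => y) false) 0
      = some (t.foldl min x) := by
  have hne : PySem.List.sorted (x :: t) (fun y => y) false ≠ [] := by
    intro h
    exact (List.cons_ne_nil x t) (((PySem.List.sorted_eq_nil_iff (x :: t) (fun y => y) false)).mp h)
  obtain ⟨m, t', hs⟩ := List.exists_cons_of_ne_nil hne
  have hmin := PySem.List.min?_id_cons x t
  have hmem : t.foldl min x ∈ x :: t := PySem.List.min?_mem hmin
  have hlow : m ≤ t.foldl min x :=
    PySem.List.key_head_sorted_le (x :: t) (fun y => y) hs _ hmem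
  have hm_mem : m ∈ x :: t := by
    rw [← PySem.List.mem_sorted (x :: t) (fun y => y) false m, hs]
    exact List.mem_cons_self
  have hup : t.foldl min x ≤ m := PySem.List.min?_isMin hmin m hm_mem
  rw [hs, PySem.List.pyGet?_zero_cons]
  congr 1
  omega

-- sorted(l)[-1] is the running max of l
theorem sorted_last (x : Int) (t : List Int) :
    PySem.List.pyGet? (PySem.List.sorted (x :: t) (fun y => y) false) (-1)
      = some (t.foldl max x) := by
  have hne : PySem.List.sorted (x :: t) (fun y => y) false ≠ [] := by
    intro h
    exact (List.cons_ne_nil x t) (((PySem.List.sorted_eq_nil_iff (x :: t) (fun y => y) false)).mp h)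
  rw [PySem.List.pyGet?_neg_one]
  obtain ⟨g, hg⟩ := Option.isSome_iff_exists.mp (List.getLast?_isSome.mpr hne)
  have hmax := PySem.List.max?_id_cons x t
  have hmem : t.foldl max x ∈ x :: t := PySem.List.max?_mem hmax
  have hs_mem : t.foldl max x ∈ PySem.List.sorted (x :: t) (fun y => y) false := by
    rw [PySem.List.mem_sorted]; exact hmem
  have hpw := PySem.List.sorted_pairwise (x :: t) (fun y => y)
  have hlow : t.foldl max x ≤ g := le_getLast_of_pairwise _ hpw g hg _ hs_mem
  have hg_mem : g ∈ x :: t := by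
    rw [← PySem.List.mem_sorted (x :: t) (fun y => y) false g]
    exact List.mem_of_getLast? hg
  have hup : g ≤ t.foldl max x := PySem.List.max?_isMax hmax g hg_mem
  rw [hg]
  congr 1
  omega

theorem differenceMaxMin_spec : Claim_equal_differenceMaxMin := by
  intro a _ hpre
  unfold Spec_differenceMaxMin
  obtain ⟨hne, -⟩ := hpre
  obtain ⟨x, rest, rfl⟩ := List.exists_cons_of_ne_nil hne
  unfold differenceMaxMin differenceMaxMin_alt
  simp only [List.map_cons]
  rw [sorted_first, sorted_last]
  have hslice : PySem.List.slice (x :: rest) (some 1) none = rest := by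
    rw [PySem.List.slice_from (x :: rest) (by omega : (0:Int) ≤ 1)]
    rfl
  simp only [hslice, foldA_fst, foldA_snd]
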